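-- pv_equiv track=rewrite | github.com/adambasha0/sam3-insect-segmentation | scripts/scripts-flatbug-dataset/sam3_flatbug_inference.py | calculate_tile_offsets
-- ===== SOURCE A (Python) =====
-- import math
-- from itertools import accumulate
-- from typing import List, Tuple, Dict, Any, Optional, Union
--
-- def equal_allocate_overlaps(total: int, segments: int, size: int) -> List[int]:
--     """
--     Generates cumulative positions for placing segments with controlled overlaps.
--
--     This is a direct port of FlatBug's geometric.equal_allocate_overlaps function.
--
--     The overlap is distributed uniformly, with the first few gaps adjusted slightly
--     to ensure the segments collectively sum to `total`.
--
--     Args: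
--         total: The total length to be covered by the segments
--         segments: The number of segments to place
--         size: The size of each segment (tile size)
--
--     Returns:
--         List of cumulative positions where each segment should be placed
--
--     Example:
--         >>> equal_allocate_overlaps(1000, 5, 250)
--         [0, 187, 374, 562, 750]
--     """
--     if segments < 2:
--         return [0] * segments
--
--     overlap = segments * size - total
--     partial_overlap, remainder = divmod(overlap, segments - 1)
--     distance = size - partial_overlap
--
--     return list(accumulate(
--         [distance - (1 if i < remainder else 0) for i in range(segments - 1)],
--         initial=0
--     ))
--
-- def calculate_tile_offsets(
--     image_size: Tuple[int, int],
--     tile_size: int,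
--     minimum_overlap: int
-- ) -> List[Tuple[Tuple[int, int], Tuple[int, int]]]:
--     """
--     Calculate tile offsets for sliding window with minimum overlap.
--
--     This is a direct port of FlatBug's geometric.calculate_tile_offsets function.
--
--     Args:
--         image_size: (width, height) of the image
--         tile_size: Size of each tile (1024)
--         minimum_overlap: Minimum overlap between tiles (384 pixels)
--
--     Returns:
--         List of ((grid_x, grid_y), (pixel_y, pixel_x)) tuples
--     """
--     w, h = image_size
--
--     # Calculate number of tiles needed in each dimension
--     x_n_tiles = math.ceil((w - minimum_overlap) / (tile_size - minimum_overlap)) if w != tile_size else 1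
--     y_n_tiles = math.ceil((h - minimum_overlap) / (tile_size - minimum_overlap)) if h != tile_size else 1
--
--     # Get evenly distributed offsets
--     x_range = equal_allocate_overlaps(w, x_n_tiles, tile_size)
--     y_range = equal_allocate_overlaps(h, y_n_tiles, tile_size)
--
--     # Return as list of ((grid_m, grid_n), (y_offset, x_offset))
--     return [((m, n), (j, i)) for n, j in enumerate(y_range) for m, i in enumerate(x_range)]
-- ===== SOURCE B (Python) =====
-- def calculate_tile_offsets(image_size, tile_size, minimum_overlap):
--     w, h = image_size
--
--     def n_tiles(length):
--         if length == tile_size: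
--             return 1
--         # exact integer ceiling division, no float round-trip
--         return -((minimum_overlap - length) // (tile_size - minimum_overlap))
--
--     def positions(total, segments):
--         if segments < 2:
--             return [0] * segments
--         partial, rem = divmod(segments * tile_size - total, segments - 1)
--         distance = tile_size - partial
--         # closed form: position k is k*distance minus one per shortened gap before k
--         return [k * distance - min(k, rem) for k in range(segments)]
--
--     xs = positions(w, n_tiles(w))
--     ys = positions(h, n_tiles(h))
--     return [((m, n), (j, i)) for n, j in enumerate(ys) for m, i in enumerate(xs)]
-- ===== Notes on version B (the rewrite author's own statement) =====
-- stated objective: simpler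
-- what changed: The overlap helper's itertools.accumulate running sum over a per-index gap list is replaced by the closed-form position formula k*distance - min(k, remainder), and the float math.ceil tile count by exact integer ceiling division.
import Mathlib
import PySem

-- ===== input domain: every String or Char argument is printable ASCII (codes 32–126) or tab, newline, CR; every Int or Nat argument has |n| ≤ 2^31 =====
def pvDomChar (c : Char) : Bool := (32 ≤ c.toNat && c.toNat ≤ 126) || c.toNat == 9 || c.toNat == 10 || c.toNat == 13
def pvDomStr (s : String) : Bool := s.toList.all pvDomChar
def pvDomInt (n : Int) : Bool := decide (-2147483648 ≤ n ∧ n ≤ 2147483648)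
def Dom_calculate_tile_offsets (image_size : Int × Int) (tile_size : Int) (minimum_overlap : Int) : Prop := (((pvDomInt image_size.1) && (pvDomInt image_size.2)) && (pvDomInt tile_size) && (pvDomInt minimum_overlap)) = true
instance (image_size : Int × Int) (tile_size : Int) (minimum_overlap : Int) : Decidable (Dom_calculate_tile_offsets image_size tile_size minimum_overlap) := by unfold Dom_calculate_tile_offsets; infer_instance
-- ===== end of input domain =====

-- B replaces the itertools.accumulate running sum over a per-index gap list by the closed-form
-- position formula k*distance - min(k, remainder), and computes the tile counts by integer
-- ceiling division instead of float math.ceil (objective: simpler; exact on Dom).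

-- ===== PORT A =====
-- math.ceil((a:int)/(b:int)) is ported as the exact integer ceiling -((-a)//b); this is exact on
-- Dom because |a| ≤ 2^33 < 2^53, so the float quotient's rounding error is below 1/|b|.
def pvCeil (a b : Int) : Int := -(PySem.Int.floordiv (-a) b)

-- list(accumulate(gaps, initial=init))
def pvAccum : Int → List Int → List Int
  | init, [] => [init]
  | init, g :: gs => init :: pvAccum (init + g) gs

def equal_allocate_overlaps (total : Int) (segments : Int) (size : Int) : List Int :=
  if segments < 2 then
    List.replicate segments.toNat 0
  else
    let overlap := segments * size - total
    let partial_overlap := PySem.Int.floordiv overlap (segments - 1)  -- divmod; divisor segments-1 ≥ 1 here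
    let remainder := PySem.Int.mod overlap (segments - 1)
    let distance := size - partial_overlap
    pvAccum 0 ((PySem.List.pyRange 0 (segments - 1) 1).map
      (fun i => distance - (if i < remainder then 1 else 0)))

def calculate_tile_offsets (image_size : Int × Int) (tile_size : Int) (minimum_overlap : Int) : List ((Int × Int) × (Int × Int)) :=
  let w := image_size.1
  let h := image_size.2
  let x_n_tiles := if w ≠ tile_size then pvCeil (w - minimum_overlap) (tile_size - minimum_overlap) else 1
  let y_n_tiles := if h ≠ tile_size then pvCeil (h - minimum_overlap) (tile_size - minimum_overlap) else 1
  let x_range := equal_allocate_overlaps w x_n_tiles tile_size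
  let y_range := equal_allocate_overlaps h y_n_tiles tile_size
  (PySem.List.enumerate y_range).flatMap (fun nj =>
    (PySem.List.enumerate x_range).map (fun mi => ((mi.1, nj.1), (nj.2, mi.2))))

-- ===== PORT B =====
def pvNTiles (tile_size : Int) (minimum_overlap : Int) (length : Int) : Int :=
  if length = tile_size then 1
  else -(PySem.Int.floordiv (minimum_overlap - length) (tile_size - minimum_overlap))

def pvPositions (tile_size : Int) (total : Int) (segments : Int) : List Int :=
  if segments < 2 then
    List.replicate segments.toNat 0
  else
    let partial_overlap := PySem.Int.floordiv (segments * tile_size - total) (segments - 1)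
    let rem := PySem.Int.mod (segments * tile_size - total) (segments - 1)
    let distance := tile_size - partial_overlap
    (PySem.List.pyRange 0 segments 1).map (fun k => k * distance - min k rem)

def calculate_tile_offsets_alt (image_size : Int × Int) (tile_size : Int) (minimum_overlap : Int) : List ((Int × Int) × (Int × Int)) :=
  let w := image_size.1
  let h := image_size.2
  let xs := pvPositions tile_size w (pvNTiles tile_size minimum_overlap w)
  let ys := pvPositions tile_size h (pvNTiles tile_size minimum_overlap h)
  (PySem.List.enumerate ys).flatMap (fun nj =>
    (PySem.List.enumerate xs).map (fun mi => ((mi.1, nj.1), (nj.2, mi.2))))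

-- ===== PRECONDITION & SPEC =====
-- Pre_ excludes tile_size = minimum_overlap with an image side ≠ tile_size: there the Python A
-- (and B) raises ZeroDivisionError in the ceiling division.
def Pre_calculate_tile_offsets (image_size : Int × Int) (tile_size : Int) (minimum_overlap : Int) : Prop :=
  tile_size ≠ minimum_overlap ∨ (image_size.1 = tile_size ∧ image_size.2 = tile_size)
instance (image_size : Int × Int) (tile_size : Int) (minimum_overlap : Int) : Decidable (Pre_calculate_tile_offsets image_size tile_size minimum_overlap) := by unfold Pre_calculate_tile_offsets; infer_instance

def pvWitness_calculate_tile_offsets : (Int × Int) × Int × Int := ((1000, 700), 250, 80)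

def Spec_calculate_tile_offsets (image_size : Int × Int) (tile_size : Int) (minimum_overlap : Int) (out : List ((Int × Int) × (Int × Int))) : Prop := out = calculate_tile_offsets_alt image_size tile_size minimum_overlap
instance (image_size : Int × Int) (tile_size : Int) (minimum_overlap : Int) (out : List ((Int × Int) × (Int × Int))) : Decidable (Spec_calculate_tile_offsets image_size tile_size minimum_overlap out) := by unfold Spec_calculate_tile_offsets; infer_instance

-- ===== CLAIM (what is proved, stated in full; the proofs are below) =====
def Claim_equal_calculate_tile_offsets : Prop := ∀ (image_size : Int × Int) (tile_size : Int) (minimum_overlap : Int), Dom_calculate_tile_offsets image_size tile_size minimum_overlap → Pre_calculate_tile_offsets image_size tile_size minimum_overlap → Spec_calculate_tile_offsets image_size tile_size minimum_overlap (calculate_tile_offsets image_size tile_size minimum_overlap)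

-- ===== LEMMAS AND PROOFS =====

-- the accumulate of the gap list equals the closed-form positions, generalized over the start
lemma pvAccum_closed (d rem : Int) :
    ∀ (n : Nat) (s : Int), 0 ≤ s →
      pvAccum (s * d - min s rem)
        ((PySem.List.pyRange s (s + n) 1).map (fun i => d - (if i < rem then 1 else 0)))
      = (PySem.List.pyRange s (s + n + 1) 1).map (fun k => k * d - min k rem) := by
  intro n
  induction n with
  | zero =>
    intro s hs
    simp [PySem.List.pyRange_one_singleton, pvAccum]
  | succ n ih =>
    intro s hs
    rw [show s + ((n+1:Nat):Int) = s + (n+1) by push_cast; ring,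
        show s + (n+1) + 1 = (s+1) + n + 1 by ring]
    rw [PySem.List.pyRange_one_cons (by omega : s < s + (n+1))]
    rw [PySem.List.pyRange_one_cons (by omega : s < (s+1) + n + 1)]
    simp only [List.map_cons, pvAccum]
    have hstep : s * d - min s rem + (d - (if s < rem then 1 else 0))
        = (s + 1) * d - min (s + 1) rem := by
      by_cases h : s < rem
      · rw [min_eq_left (by omega), min_eq_left (by omega), if_pos h]; ring
      · rw [min_eq_right (by omega), min_eq_right (by omega), if_neg h]; ring
    rw [hstep]
    have := ih (s + 1) (by omega)
    rw [show s + 1 + (n:Int) = s + (n+1) by ring] at this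
    rw [show (s:Int) + 1 + n + 1 = s + (n+1) + 1 by ring, this]

lemma eao_eq_positions (total segments size : Int) :
    equal_allocate_overlaps total segments size = pvPositions size total segments := by
  unfold equal_allocate_overlaps pvPositions
  by_cases hseg : segments < 2
  · simp [hseg]
  · simp only [if_neg hseg]
    rw [not_lt] at hseg
    set ov := segments * size - total with hov
    have hpos : 0 < segments - 1 := by omega
    have hrem : 0 ≤ PySem.Int.mod ov (segments - 1) := PySem.Int.mod_nonneg _ hpos
    have h := pvAccum_closed (size - PySem.Int.floordiv ov (segments - 1))
      (PySem.Int.mod ov (segments - 1)) (segments - 1).toNat 0 le_rfl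
    rw [show ((0:Int) + ((segments - 1).toNat : Int)) = segments - 1 by omega,
        show (0:Int) * _ - min 0 (PySem.Int.mod ov (segments - 1)) = 0 by
          rw [min_eq_left hrem]; ring,
        show (segments - 1 + 1 : Int) = segments by ring] at h
    exact h

lemma ntiles_eq (w tile_size minimum_overlap : Int) :
    (if w ≠ tile_size then pvCeil (w - minimum_overlap) (tile_size - minimum_overlap) else 1)
      = pvNTiles tile_size minimum_overlap w := by
  unfold pvCeil pvNTiles
  by_cases h : w = tile_size
  · simp [h]
  · rw [if_pos (show w ≠ tile_size from h), if_neg h, neg_sub]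

-- ===== VERDICT (by name: the statement is the Claim_ definition above) =====
theorem calculate_tile_offsets_spec : Claim_equal_calculate_tile_offsets := by
  intro image_size tile_size minimum_overlap _ _
  unfold Spec_calculate_tile_offsets
  simp only [calculate_tile_offsets, calculate_tile_offsets_alt, ntiles_eq,
    eao_eq_positions]
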